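-- pv_equiv track=rewrite | github.com/jiseong7278/Baekjoon-Repo | 프로그래머스/2/87390. n＾2 배열 자르기/n＾2 배열 자르기.py | solution
-- ===== SOURCE A (Python) =====
-- def solution(n, left, right):
--     answer = []
--
--     y = left // n
--     x = (left % n)
--
--     for i in range(0, right - left + 1):
--         answer.append(max(y, x)+1)
--         x += 1
--         if x > n-1:
--             x = 0
--             y += 1
--
--     return answer
-- ===== SOURCE B (Python) =====
-- def solution(n, left, right):
--     # Row-block construction: build each touched row of the n x n array as a
--     # run of equal values followed by a consecutive range, then clip it to
--     # [left, right] by slicing -- no per-element computation, no carry state.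
--     out = []
--     for r in range(left // n, right // n + 1):
--         reps = min(max(r + 1, 0), n)
--         row = [r + 1] * reps + list(range(reps + 1, n + 1))
--         lo = max(left - r * n, 0)
--         hi = min(right + 1 - r * n, n)
--         out += row[lo:hi]
--     return out
-- ===== Notes on version B (the rewrite author's own statement) =====
-- stated objective: alternative
-- what changed: Replaces A's per-element loop with maintained (x,y) counters and a carry-reset branch by a row-block construction: each touched row of the n x n array is built wholesale as a run of equal values ([r+1]*reps) followed by a consecutive range, then clipped to [left,right] by slicing; no per-element value computation or carry state remains.
-- outside the precondition, e.g. on solution(-3, -2, -1): A returns [1, 2], B returns []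
import Mathlib
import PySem

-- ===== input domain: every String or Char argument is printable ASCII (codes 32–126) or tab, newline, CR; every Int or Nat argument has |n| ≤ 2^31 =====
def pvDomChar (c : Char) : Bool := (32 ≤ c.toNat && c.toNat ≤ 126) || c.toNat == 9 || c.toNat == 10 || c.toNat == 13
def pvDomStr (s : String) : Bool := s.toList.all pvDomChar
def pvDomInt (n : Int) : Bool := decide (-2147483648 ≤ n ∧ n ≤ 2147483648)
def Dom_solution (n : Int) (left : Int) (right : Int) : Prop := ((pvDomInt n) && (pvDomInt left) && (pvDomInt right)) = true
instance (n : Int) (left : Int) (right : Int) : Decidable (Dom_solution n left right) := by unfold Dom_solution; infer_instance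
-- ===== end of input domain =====

-- B replaces A's per-element carry loop by a per-row block construction (run of equal
-- values + consecutive range, clipped by slicing) — objective: alternative algorithm.


-- ===== PORT A =====
-- loop body of A: state (answer, x, y); append max(y,x)+1, then x += 1 with carry into y
-- (answer is accumulated in reverse — cons instead of append — and reversed once at the
--  end: the same loop and state, with Python's O(1) list.append kept O(1))
def solutionStep (n : Int) (st : List Int × Int × Int) : List Int × Int × Int :=
  let ans := (max st.2.2 st.2.1 + 1) :: st.1
  let x := st.2.1 + 1
  if x > n - 1 then (ans, 0, st.2.2 + 1) else (ans, x, st.2.2)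

def solution (n : Int) (left : Int) (right : Int) : List Int :=
  (((PySem.List.pyRange 0 (right - left + 1) 1).foldl
      (fun st _ => solutionStep n st)
      ([], PySem.Int.mod left n, PySem.Int.floordiv left n)).1).reverse

-- ===== PORT B =====
-- for each touched row r: row = [r+1]*reps + list(range(reps+1, n+1)); out += row[lo:hi]
-- (out is accumulated as reversed chunks — 'out += chunk' becomes 'chunk.reverse ++ out' —
--  and reversed once at the end: the same per-row chunks, with Python's O(k) extend kept O(k))
def solution_alt (n : Int) (left : Int) (right : Int) : List Int :=
  ((PySem.List.pyRange (PySem.Int.floordiv left n) (PySem.Int.floordiv right n + 1) 1).foldl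
    (fun out r =>
      let reps := min (max (r + 1) 0) n
      let row := PySem.List.pyRepeat [r + 1] reps ++ PySem.List.pyRange (reps + 1) (n + 1) 1
      (PySem.List.slice row (some (max (left - r * n) 0))
          (some (min (right + 1 - r * n) n))).reverse ++ out)
    []).reverse

-- ===== PRECONDITION & SPEC =====
-- Pre_ excludes n ≤ 0: at n = 0 A raises ZeroDivisionError (B raises too), and for n ≤ -1
-- A's carry reset at x > n-1 fires immediately, producing values unrelated to any row/column
-- of an n×n array — an artefact of the carry nobody would specify; the puzzle's domain is n ≥ 1.
def Pre_solution (n : Int) (left : Int) (right : Int) : Prop := 1 ≤ n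
instance (n : Int) (left : Int) (right : Int) : Decidable (Pre_solution n left right) := by unfold Pre_solution; infer_instance
def pvWitness_solution : Int × Int × Int := (3, 2, 7)

def Spec_solution (n : Int) (left : Int) (right : Int) (out : List Int) : Prop := out = solution_alt n left right
instance (n : Int) (left : Int) (right : Int) (out : List Int) : Decidable (Spec_solution n left right out) := by unfold Spec_solution; infer_instance

-- ===== CLAIM (what is proved, stated in full; the proofs are below) =====
def Claim_equal_solution : Prop := ∀ (n : Int) (left : Int) (right : Int), Dom_solution n left right → Pre_solution n left right → Spec_solution n left right (solution n left right)

-- ===== LEMMAS AND PROOFS =====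

-- proof-only reference value: the flat segment [left, right] mapped through divmod
def pvRef (n left right : Int) : List Int :=
  (PySem.List.pyRange left (right + 1) 1).map
    (fun k => max (PySem.Int.floordiv k n) (PySem.Int.mod k n) + 1)

-- ---------- A-side: solution = pvRef ----------

-- a fold whose body ignores the element is an iterate of length-many steps
lemma foldl_const_iterate {α β : Type} (g : α → α) (xs : List β) (init : α) :
    xs.foldl (fun s _ => g s) init = g^[xs.length] init := by
  induction xs generalizing init with
  | nil => rfl
  | cons a xs ih => simp [List.foldl, ih, Function.iterate_succ_apply]

-- one carry step advances (l % n, l / n) to ((l+1) % n, (l+1) / n)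
lemma carry_mod (n l : Int) (hn : 0 < n) :
    (if l % n + 1 > n - 1 then (0 : Int) else l % n + 1) = (l + 1) % n ∧
    (if l % n + 1 > n - 1 then l / n + 1 else l / n) = (l + 1) / n := by
  have hid : n * (l / n) + l % n = l := Int.mul_ediv_add_emod l n
  have hr0 : 0  ≤ l % n := Int.emod_nonneg l (by omega)
  have hrn : l % n < n := Int.emod_lt_of_pos l hn
  by_cases h : l % n + 1 > n - 1
  · have hr : l % n = n - 1 := le_antisymm (by linarith) (by linarith)
    have hl1 : l + 1 = n * (l / n + 1) := by rw [mul_add, mul_one]; linarith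
    refine ⟨?_, ?_⟩
    · rw [if_pos h, hl1]
      exact (Int.mul_emod_right n _).symm
    · rw [if_pos h, hl1]
      rw [Int.mul_ediv_cancel_left _ (by omega : n ≠ 0)]
  · have hl1 : l + 1 = (l % n + 1) + n * (l / n) := by linarith
    refine ⟨?_, ?_⟩
    · rw [if_neg h, hl1, Int.add_mul_emod_self_left,
          Int.emod_eq_of_lt (show (0:Int) ≤ l % n + 1 by linarith) (show l % n + 1 < n by linarith)]
    · rw [if_neg h, hl1, Int.add_mul_ediv_left _ _ (by omega : n ≠ 0),
          Int.ediv_eq_zero_of_lt (show (0:Int) ≤ l % n + 1 by linarith) (show l % n + 1 < n by linarith)]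
      ring

-- loop invariant: m iterated carry steps from (l % n, l / n) produce, reversed, the
-- divmod values of l..l+m-1
lemma iterate_step_eq (n : Int) (hn : 1 ≤ n) :
    ∀ (m : Nat) (l : Int) (acc : List Int),
    ((solutionStep n)^[m] (acc, PySem.Int.mod l n, PySem.Int.floordiv l n)).1
      = ((PySem.List.pyRange l (l + m) 1).map
          (fun k => max (PySem.Int.floordiv k n) (PySem.Int.mod k n) + 1)).reverse ++ acc := by
  intro m
  induction m with
  | zero =>
    intro l acc
    simp [PySem.List.pyRange_one_eq_nil (le_refl l)]
  | succ m ih =>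
    intro l acc
    have hmod := PySem.Int.mod_eq_emod_of_pos (a := l) (by omega : (0:Int) < n)
    have hmod1 := PySem.Int.mod_eq_emod_of_pos (a := l + 1) (by omega : (0:Int) < n)
    have hdiv := PySem.Int.floordiv_eq_ediv_of_pos (a := l) (by omega : (0:Int) < n)
    have hdiv1 := PySem.Int.floordiv_eq_ediv_of_pos (a := l + 1) (by omega : (0:Int) < n)
    have hc := carry_mod n l (by omega)
    have hstep : solutionStep n (acc, PySem.Int.mod l n, PySem.Int.floordiv l n)
        = ((max (PySem.Int.floordiv l n) (PySem.Int.mod l n) + 1) :: acc,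
           PySem.Int.mod (l + 1) n, PySem.Int.floordiv (l + 1) n) := by
      simp only [solutionStep, hmod, hmod1, hdiv, hdiv1]
      by_cases h : l % n + 1 > n - 1
      · simp only [← hc.1, ← hc.2, if_pos h]
      · simp only [← hc.1, ← hc.2, if_neg h]
    rw [Function.iterate_succ_apply, hstep, ih (l + 1)]
    rw [PySem.List.pyRange_one_cons (by omega : l < l + (m + 1 : Nat))]
    have hb : l + ((m : Nat) + 1 : Int) = l + 1 + (m : Nat) := by ring
    push_cast
    rw [hb]
    simp [List.reverse_cons, List.append_assoc]

lemma solution_eq_ref (n left right : Int) (hn : 1 ≤ n) :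
    solution n left right = pvRef n left right := by
  unfold solution pvRef
  rw [foldl_const_iterate (solutionStep n), PySem.List.length_pyRange_one]
  have key := iterate_step_eq n hn (right - left + 1 - 0).toNat left []
  by_cases h : left ≤ right + 1
  · have hb : (left + ((right - left + 1 - 0).toNat : Int)) = right + 1 := by omega
    rw [key, hb, List.append_nil, List.reverse_reverse]
  · have h0 : (right - left + 1 - 0).toNat = 0 := by omega
    rw [h0] at key
    rw [h0, key,
        PySem.List.pyRange_one_eq_nil (show left + ((0:Nat):Int) ≤ left by omega),
        PySem.List.pyRange_one_eq_nil (show right + 1 ≤ left by omega)]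
    simp

-- ---------- B-side: solution_alt = pvRef ----------

-- pyRange is translation-equivariant
lemma pyRange_map_add (a b t : Int) :
    (PySem.List.pyRange a b 1).map (fun x => x + t) = PySem.List.pyRange (a + t) (b + t) 1 := by
  rw [PySem.List.pyRange_one, PySem.List.pyRange_one, List.map_map]
  have hb : (b + t - (a + t)) = b - a := by ring
  rw [hb]
  apply List.map_congr_left
  intro k _
  simp [Function.comp]
  ring

-- dropping d elements of an integer range shifts its start
lemma pyRange_drop : ∀ (d : Nat) (a b : Int),
    (PySem.List.pyRange a b 1).drop d = PySem.List.pyRange (a + d) b 1 := by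
  intro d
  induction d with
  | zero => intro a b; simp
  | succ d ih =>
    intro a b
    by_cases h : a < b
    · rw [PySem.List.pyRange_one_cons h, List.drop_succ_cons, ih (a + 1) b]
      congr 1
      push_cast
      ring
    · rw [PySem.List.pyRange_one_eq_nil (by omega), List.drop_nil,
          PySem.List.pyRange_one_eq_nil (by push_cast; omega)]

-- taking t elements of an integer range clamps its end
lemma pyRange_take : ∀ (t : Nat) (a b : Int),
    (PySem.List.pyRange a b 1).take t = PySem.List.pyRange a (min (a + t) b) 1 := by
  intro t
  induction t with
  | zero =>
    intro a b
    rw [List.take_zero, PySem.List.pyRange_one_eq_nil (by push_cast; omega)]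
  | succ t ih =>
    intro a b
    by_cases h : a < b
    · rw [PySem.List.pyRange_one_cons h, List.take_succ_cons, ih (a + 1) b]
      have hmin : min (a + ((t + 1 : Nat) : Int)) b = min (a + 1 + (t : Int)) b := by
        push_cast; omega
      rw [hmin, PySem.List.pyRange_one_cons (by omega : a < min (a + 1 + (t : Int)) b)]
    · rw [PySem.List.pyRange_one_eq_nil (by omega), List.take_nil,
          PySem.List.pyRange_one_eq_nil (by push_cast; omega)]

-- the row list B builds IS row r of the n×n table: entry c is max(r,c)+1
lemma row_eq (n r : Int) (hn : 1 ≤ n) :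
    PySem.List.pyRepeat [r + 1] (min (max (r + 1) 0) n)
      ++ PySem.List.pyRange (min (max (r + 1) 0) n + 1) (n + 1) 1
    = (PySem.List.pyRange 0 n 1).map (fun c => max r c + 1) := by
  set reps := min (max (r + 1) 0) n with hreps
  have h0 : 0 ≤ reps := by simp [hreps]; omega
  have h1 : reps ≤ n := by simp [hreps]
  rw [PySem.List.pyRange_one_append 0 reps n h0 h1, List.map_append]
  congr 1
  · -- constant run
    have hconst : (PySem.List.pyRange 0 reps 1).map (fun c => max r c + 1)
        = (PySem.List.pyRange 0 reps 1).map (fun _ => r + 1) := by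
      apply List.map_congr_left
      intro c hc
      rw [PySem.List.mem_pyRange_one] at hc
      have : c ≤ r := by simp [hreps] at h0 h1 ⊢; omega
      simp [max_eq_left this]
    rw [hconst, List.map_const', PySem.List.length_pyRange_one,
        PySem.List.pyRepeat_singleton]
    congr 1
    omega
  · -- consecutive tail
    have htail : (PySem.List.pyRange reps n 1).map (fun c => max r c + 1)
        = (PySem.List.pyRange reps n 1).map (fun c => c + 1) := by
      apply List.map_congr_left
      intro c hc
      rw [PySem.List.mem_pyRange_one] at hc
      have : r ≤ c := by simp [hreps] at hc ⊢; omega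
      simp [max_eq_right this]
    rw [htail, pyRange_map_add]

-- one clipped row equals the corresponding flat segment of pvRef's map
lemma seg_eq (n r left right : Int) (hn : 1 ≤ n)
    (hr0 : PySem.Int.floordiv left n ≤ r) (hr1 : r ≤ PySem.Int.floordiv right n) :
    PySem.List.slice
        (PySem.List.pyRepeat [r + 1] (min (max (r + 1) 0) n)
          ++ PySem.List.pyRange (min (max (r + 1) 0) n + 1) (n + 1) 1)
        (some (max (left - r * n) 0)) (some (min (right + 1 - r * n) n))
    = (PySem.List.pyRange (max left (r * n)) (min (right + 1) ((r + 1) * n)) 1).map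
        (fun k => max (PySem.Int.floordiv k n) (PySem.Int.mod k n) + 1) := by
  have hnpos : (0 : Int) < n := by omega
  rw [PySem.Int.floordiv_eq_ediv_of_pos hnpos] at hr0 hr1
  have hlelo : left / n * n ≤ r * n := Int.mul_le_mul_of_nonneg_right hr0 (by omega)
  have hlehi : r * n ≤ right / n * n := Int.mul_le_mul_of_nonneg_right hr1 (by omega)
  have hlid : left / n * n + left % n = left := Int.ediv_mul_add_emod left n
  have hlm : left % n < n := Int.emod_lt_of_pos left hnpos
  have hrid : right / n * n + right % n = right := Int.ediv_mul_add_emod right n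
  have hrm : 0 ≤ right % n := Int.emod_nonneg right (by omega)
  have hexp : (r + 1) * n = r * n + n := by ring
  have hlo0 : 0 ≤ max (left - r * n) 0 := by omega
  have hlon : max (left - r * n) 0 ≤ n := by omega
  have hhi0 : 0 ≤ min (right + 1 - r * n) n := by omega
  have hhin : min (right + 1 - r * n) n ≤ n := by omega
  rw [row_eq n r hn,
      PySem.List.slice_toNat _ hlo0 hhi0,
      ← List.map_drop, ← List.map_take,
      pyRange_drop, pyRange_take]
  have hcast1 : ((0 : Int) + ((max (left - r * n) 0).toNat : Int)) = max (left - r * n) 0 := by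
    omega
  rw [hcast1]
  have hcast2 : (max (left - r * n) 0
        + (((min (right + 1 - r * n) n).toNat - (max (left - r * n) 0).toNat : Nat) : Int))
      = max (max (left - r * n) 0) (min (right + 1 - r * n) n) := by omega
  rw [hcast2]
  have hminn : min (max (max (left - r * n) 0) (min (right + 1 - r * n) n)) n
      = max (max (left - r * n) 0) (min (right + 1 - r * n) n) := by omega
  rw [hminn]
  have hmaxeq : PySem.List.pyRange (max (left - r * n) 0)
        (max (max (left - r * n) 0) (min (right + 1 - r * n) n)) 1
      = PySem.List.pyRange (max (left - r * n) 0) (min (right + 1 - r * n) n) 1 := by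
    rcases le_total (max (left - r * n) 0) (min (right + 1 - r * n) n) with h | h
    · rw [max_eq_right h]
    · rw [max_eq_left h, PySem.List.pyRange_one_eq_nil (le_refl (max (left - r * n) 0)),
          PySem.List.pyRange_one_eq_nil h]
  rw [hmaxeq]
  have hb1 : max left (r * n) = max (left - r * n) 0 + r * n := by omega
  have hb2 : min (right + 1) ((r + 1) * n) = min (right + 1 - r * n) n + r * n := by
    rcases le_total (right + 1 - r * n) n with h | h
    · rw [min_eq_left h]; omega
    · rw [min_eq_right h]; omega
  rw [hb1, hb2, ← pyRange_map_add (max (left - r * n) 0)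
        (min (right + 1 - r * n) n) (r * n), List.map_map]
  apply List.map_congr_left
  intro c hc
  rw [PySem.List.mem_pyRange_one] at hc
  have hc0 : 0 ≤ c := by omega
  have hcn : c < n := by omega
  have hd : PySem.Int.floordiv (c + r * n) n = r := by
    rw [PySem.Int.floordiv_eq_iff_of_pos hnpos]
    omega
  have hm : PySem.Int.mod (c + r * n) n = c := by
    have hmm := PySem.Int.floordiv_mul_add_mod (c + r * n) n
    rw [hd] at hmm
    omega
  simp only [Function.comp, hd, hm]

-- flattening the clipped rows recovers the flat range [L, R]
lemma cover (n : Int) (hn : 1 ≤ n) (f : Int → Int) :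
    ∀ (m : Nat) (L R : Int), PySem.Int.floordiv L n + m = PySem.Int.floordiv R n →
    (PySem.List.pyRange (PySem.Int.floordiv L n) (PySem.Int.floordiv R n + 1) 1).flatMap
        (fun r => (PySem.List.pyRange (max L (r * n)) (min (R + 1) ((r + 1) * n)) 1).map f)
      = (PySem.List.pyRange L (R + 1) 1).map f := by
  have hnpos : (0 : Int) < n := by omega
  intro m
  induction m with
  | zero =>
    intro L R hm
    rw [PySem.Int.floordiv_eq_ediv_of_pos hnpos, PySem.Int.floordiv_eq_ediv_of_pos hnpos]
      at hm ⊢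
    simp only [Nat.cast_zero, add_zero] at hm
    rw [← hm, PySem.List.pyRange_one_cons (by omega : L / n < L / n + 1),
        PySem.List.pyRange_one_eq_nil (by omega), List.flatMap_cons, List.flatMap_nil,
        List.append_nil]
    have hLid : L / n * n + L % n = L := Int.ediv_mul_add_emod L n
    have hL0 : 0 ≤ L % n := Int.emod_nonneg L (by omega)
    have hRid : R / n * n + R % n = R := Int.ediv_mul_add_emod R n
    have hRn : R % n < n := Int.emod_lt_of_pos R hnpos
    have hR0 : 0 ≤ R % n := Int.emod_nonneg R (by omega)
    have hexp : (L / n + 1) * n = L / n * n + n := by ring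
    have hx : R / n * n = L / n * n := by rw [hm]
    have h1 : max L (L / n * n) = L := by omega
    have h2 : min (R + 1) ((L / n + 1) * n) = R + 1 := by omega
    rw [h1, h2]
  | succ m ih =>
    intro L R hm
    rw [PySem.Int.floordiv_eq_ediv_of_pos hnpos, PySem.Int.floordiv_eq_ediv_of_pos hnpos]
      at hm ⊢
    have hLid : L / n * n + L % n = L := Int.ediv_mul_add_emod L n
    have hL0 : 0 ≤ L % n := Int.emod_nonneg L (by omega)
    have hLn : L % n < n := Int.emod_lt_of_pos L hnpos
    have hRid : R / n * n + R % n = R := Int.ediv_mul_add_emod R n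
    have hR0 : 0 ≤ R % n := Int.emod_nonneg R (by omega)
    set L' := (L / n + 1) * n with hL'
    have hL'e : L' = L / n * n + n := by rw [hL']; ring
    have hL'div : L' / n = L / n + 1 := by
      rw [hL', Int.mul_ediv_cancel _ (by omega : n ≠ 0)]
    have hrow : L / n + 1 ≤ R / n := by omega
    have hstep : (L / n + 1) * n ≤ R / n * n :=
      Int.mul_le_mul_of_nonneg_right hrow (by omega)
    have hLL' : L < L' := by omega
    have hL'R : L' ≤ R := by omega
    rw [PySem.List.pyRange_one_cons (by omega : L / n < R / n + 1), List.flatMap_cons]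
    have hfirst : max L (L / n * n) = L := by omega
    have hsecond : min (R + 1) ((L / n + 1) * n) = L' := by omega
    rw [hfirst, hsecond]
    have hbodies : ∀ r ∈ PySem.List.pyRange (L / n + 1) (R / n + 1) 1,
        (PySem.List.pyRange (max L (r * n)) (min (R + 1) ((r + 1) * n)) 1).map f
        = (PySem.List.pyRange (max L' (r * n)) (min (R + 1) ((r + 1) * n)) 1).map f := by
      intro r hr
      rw [PySem.List.mem_pyRange_one] at hr
      have h1 : (L / n + 1) * n ≤ r * n := Int.mul_le_mul_of_nonneg_right hr.1 (by omega)
      have hmx : max L (r * n) = max L' (r * n) := by omega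
      rw [hmx]
    rw [List.flatMap_congr hbodies]
    have harg : PySem.Int.floordiv L' n + (m : Int) = PySem.Int.floordiv R n := by
      rw [PySem.Int.floordiv_eq_ediv_of_pos hnpos, PySem.Int.floordiv_eq_ediv_of_pos hnpos,
          hL'div]
      push_cast at hm
      omega
    have hih := ih L' R harg
    rw [PySem.Int.floordiv_eq_ediv_of_pos hnpos, PySem.Int.floordiv_eq_ediv_of_pos hnpos,
        hL'div] at hih
    rw [hih, ← List.map_append,
        ← PySem.List.pyRange_one_append L L' (R + 1) (by omega) (by omega)]

-- 'out += chunk' accumulated as reversed chunks is the reversed flatMap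
lemma foldl_revchunk_eq_flatMap {α β : Type} (g : β → List α) :
    ∀ (l : List β) (acc : List α),
    l.foldl (fun out x => (g x).reverse ++ out) acc = (l.flatMap g).reverse ++ acc := by
  intro l
  induction l with
  | nil => intro acc; simp
  | cons x l ih =>
    intro acc
    simp [List.foldl, ih, List.reverse_append, List.append_assoc]

lemma solution_alt_eq_ref (n left right : Int) (hn : 1 ≤ n) :
    solution_alt n left right = pvRef n left right := by
  have hnpos : (0 : Int) < n := by omega
  unfold solution_alt
  show ((PySem.List.pyRange (PySem.Int.floordiv left n) (PySem.Int.floordiv right n + 1) 1).foldl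
      (fun out r =>
        (PySem.List.slice
          (PySem.List.pyRepeat [r + 1] (min (max (r + 1) 0) n)
            ++ PySem.List.pyRange (min (max (r + 1) 0) n + 1) (n + 1) 1)
          (some (max (left - r * n) 0)) (some (min (right + 1 - r * n) n))).reverse ++ out)
      []).reverse
    = pvRef n left right
  rw [foldl_revchunk_eq_flatMap (fun r =>
        PySem.List.slice
          (PySem.List.pyRepeat [r + 1] (min (max (r + 1) 0) n)
            ++ PySem.List.pyRange (min (max (r + 1) 0) n + 1) (n + 1) 1)
          (some (max (left - r * n) 0)) (some (min (right + 1 - r * n) n))),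
      List.append_nil, List.reverse_reverse]
  have hseg : ∀ r ∈ PySem.List.pyRange (PySem.Int.floordiv left n)
      (PySem.Int.floordiv right n + 1) 1,
      PySem.List.slice
        (PySem.List.pyRepeat [r + 1] (min (max (r + 1) 0) n)
          ++ PySem.List.pyRange (min (max (r + 1) 0) n + 1) (n + 1) 1)
        (some (max (left - r * n) 0)) (some (min (right + 1 - r * n) n))
      = (PySem.List.pyRange (max left (r * n)) (min (right + 1) ((r + 1) * n)) 1).map
          (fun k => max (PySem.Int.floordiv k n) (PySem.Int.mod k n) + 1) := by
    intro r hr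
    rw [PySem.List.mem_pyRange_one] at hr
    exact seg_eq n r left right hn hr.1 (by omega)
  rw [List.flatMap_congr hseg]
  by_cases hrows : PySem.Int.floordiv left n ≤ PySem.Int.floordiv right n
  · exact cover n hn _ (PySem.Int.floordiv right n - PySem.Int.floordiv left n).toNat
      left right (by omega)
  · -- no touched row: the flat range is empty too
    rw [PySem.Int.floordiv_eq_ediv_of_pos hnpos, PySem.Int.floordiv_eq_ediv_of_pos hnpos]
      at hrows
    have hRL : right < left := by
      by_contra h
      exact hrows (Int.ediv_le_ediv (by omega) (by omega))
    rw [PySem.List.pyRange_one_eq_nil (by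
          rw [PySem.Int.floordiv_eq_ediv_of_pos hnpos, PySem.Int.floordiv_eq_ediv_of_pos hnpos]
          omega),
        List.flatMap_nil]
    unfold pvRef
    rw [PySem.List.pyRange_one_eq_nil (by omega), List.map_nil]

-- ===== VERDICT (by name: the statement is the Claim_ definition above) =====
theorem solution_spec : Claim_equal_solution := by
  intro n left right _ hpre
  unfold Spec_solution
  rw [solution_eq_ref n left right hpre, solution_alt_eq_ref n left right hpre]
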